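-- pv_equiv track=rewrite | github.com/pipe-works/pipeworks_mud_server | src/mud_server/api/password_policy.py | _find_repeated
-- ===== SOURCE A (Python) =====
-- def _find_repeated(password: str, max_allowed: int) -> str | None:
--     """
--     Find repeated character patterns exceeding the allowed limit.
--
--     Detects sequences where the same character is repeated too many
--     times consecutively, such as 'aaa' or '1111'.
--
--     Args:
--         password: Password to check.
--         max_allowed: Maximum allowed consecutive repetitions.
--
--     Returns:
--         The repeated pattern found, or None if within limits.
--     """
--     if max_allowed < 1:
--         return None
--
--     current_char = ""
--     current_count = 0
--
--     for char in password:
--         if char == current_char: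
--             current_count += 1
--             if current_count > max_allowed:
--                 return char * current_count
--         else:
--             current_char = char
--             current_count = 1
--
--     return None
-- ===== SOURCE B (Python) =====
-- def _find_repeated(password: str, max_allowed: int) -> str | None:
--     """Sliding-window view: the first run exceeding the limit is witnessed by
--     the earliest window of max_allowed+1 consecutive positions holding a
--     single character; return that window."""
--     if max_allowed < 1:
--         return None
--     w = max_allowed + 1
--     for i in range(len(password) - w + 1):
--         chunk = password[i:i + w]
--         if chunk == chunk[0] * w:
--             return chunk
--     return None
-- ===== Notes on version B (the rewrite author's own statement) =====
-- stated objective: alternative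
-- what changed: Replaces A's char-by-char counter state machine with a sliding-window check: scan window starts i and return the first length-(max_allowed+1) substring consisting of a single repeated character.
import Mathlib
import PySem

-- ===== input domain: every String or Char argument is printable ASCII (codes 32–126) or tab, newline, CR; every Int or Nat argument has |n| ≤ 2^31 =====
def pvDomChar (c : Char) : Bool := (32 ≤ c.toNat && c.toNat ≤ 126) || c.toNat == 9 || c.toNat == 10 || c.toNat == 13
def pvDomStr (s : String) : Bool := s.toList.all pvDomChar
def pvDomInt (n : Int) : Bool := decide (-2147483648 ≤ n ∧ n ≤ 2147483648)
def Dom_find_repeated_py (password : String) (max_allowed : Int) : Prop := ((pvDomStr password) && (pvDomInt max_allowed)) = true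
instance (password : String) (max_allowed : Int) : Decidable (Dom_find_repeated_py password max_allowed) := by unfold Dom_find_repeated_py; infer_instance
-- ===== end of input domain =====

-- B replaces A's char-by-char counter state machine with a sliding-window scan
-- (objective: alternative); same return value everywhere.

-- ===== PORT A =====
-- A's for-loop over the characters, carrying current_char (a Python string,
-- initially "") and current_count; early return 'char * current_count' when
-- the count exceeds max_allowed.
def findRepLoopA (l : List Char) (cur : String) (cnt : Int) (m : Int) : Option String :=
  match l with
  | [] => none
  | c :: rest =>
    if String.ofList [c] = cur then
      let cnt' := cnt + 1
      if cnt' > m then some (String.ofList (List.replicate cnt'.toNat c))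
      else findRepLoopA rest cur cnt' m
    else
      findRepLoopA rest (String.ofList [c]) 1 m

def find_repeated_py (password : String) (max_allowed : Int) : Option String :=
  if max_allowed < 1 then none
  else findRepLoopA password.toList "" 0 max_allowed

-- ===== PORT B =====
-- B's for-loop over the window starts from range(len(password) - w + 1):
-- chunk = password[i:i+w]; return chunk if chunk == chunk[0] * w.
-- (chunk[0] on an empty chunk would be an IndexError, hence none; the range
-- bound makes every chunk length w, so that branch is unreachable.)
def windowScanB (cl : List Char) (w : Int) (idxs : List Int) : Option String :=
  match idxs with
  | [] => none
  | i :: rest =>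
    let chunk := PySem.List.slice cl (some i) (some (i + w))
    match PySem.List.pyGet? chunk 0 with
    | none => none
    | some c =>
      if chunk = List.replicate w.toNat c then some (String.ofList chunk)
      else windowScanB cl w rest

def find_repeated_py_alt (password : String) (max_allowed : Int) : Option String :=
  if max_allowed < 1 then none
  else
    let cl := password.toList
    let w := max_allowed + 1
    windowScanB cl w (PySem.List.pyRange 0 ((cl.length : Int) - w + 1) 1)

-- ===== PRECONDITION & SPEC =====
def Spec_find_repeated_py (password : String) (max_allowed : Int) (out : Option String) : Prop := out = find_repeated_py_alt password max_allowed
instance (password : String) (max_allowed : Int) (out : Option String) : Decidable (Spec_find_repeated_py password max_allowed out) := by unfold Spec_find_repeated_py; infer_instance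

-- ===== CLAIM (what is proved, stated in full; the proofs are below) =====
def Claim_equal_find_repeated_py : Prop := ∀ (password : String) (max_allowed : Int), Dom_find_repeated_py password max_allowed → Spec_find_repeated_py password max_allowed (find_repeated_py password max_allowed)

-- ===== LEMMAS AND PROOFS =====

theorem ofList_inj {l l' : List Char} (h : String.ofList l = String.ofList l') : l = l' := by
  have := congrArg String.toList h
  simpa using this

-- Proof-side normal form of one window test at Nat index i.
def winHit (l : List Char) (wn : Nat) (i : Nat) : Option (List Char) :=
  match ((l.drop i).take wn).head? with
  | none => none
  | some c =>
    if (l.drop i).take wn = List.replicate wn c then some ((l.drop i).take wn) else none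

-- Proof-side normal form of B: first all-equal window of length wn.
def winF (l : List Char) (wn : Nat) : Option (List Char) :=
  (List.range (l.length + 1 - wn)).findSome? (winHit l wn)

-- B's scan over casted Nat indices is winHit-findSome?.
theorem windowScanB_eq (cl : List Char) (wn : Nat) (m : Int) (hm : 1 ≤ m) (hw : m + 1 = (wn : Int)) :
    ∀ is : List Nat, (∀ i ∈ is, i < cl.length) →
    windowScanB cl (m + 1) (is.map (fun k => Int.ofNat k)) =
      (is.findSome? (winHit cl wn)).map String.ofList := by
  have hwn : 1 ≤ wn := by omega
  intro is
  induction is with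
  | nil => intro _; simp [windowScanB]
  | cons i is' ih =>
    intro hmem
    have hi : i < cl.length := hmem i (by simp)
    rw [List.map_cons, windowScanB]
    simp only [Int.ofNat_eq_natCast] at ih ⊢
    have hsl : PySem.List.slice cl (some (i : Int)) (some ((i : Int) + (m + 1))) =
        (cl.drop i).take wn := by
      rw [hw]; exact PySem.List.slice_natCast_add cl i wn
    rw [hsl]
    have hne : (cl.drop i).take wn ≠ [] := by
      intro h
      have := congrArg List.length h
      simp [List.length_take, List.length_drop] at this
      omega
    rw [PySem.List.pyGet?_zero, List.findSome?_cons]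
    unfold winHit
    rw [← List.head?_eq_getElem?]
    match hh : ((cl.drop i).take wn).head? with
    | none => exact absurd (List.head?_eq_none_iff.mp hh) hne
    | some c =>
      have htn : (m + 1).toNat = wn := by omega
      rw [htn]
      dsimp only
      by_cases hrep : (cl.drop i).take wn = List.replicate wn c
      · rw [if_pos hrep, if_pos hrep]
        simp
      · rw [if_neg hrep, if_neg hrep]
        dsimp only
        exact ih (fun j hj => hmem j (by simp [hj]))

-- W1: a leading run of length ≥ wn makes window 0 hit.
theorem winF_long_run (k wn : Nat) (c : Char) (rest : List Char)
    (hk : wn ≤ k) (hwn : 1 ≤ wn) :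
    winF (List.replicate k c ++ rest) wn = some (List.replicate wn c) := by
  unfold winF
  have hlen : (List.replicate k c ++ rest).length = k + rest.length := by simp
  have hn : (List.replicate k c ++ rest).length + 1 - wn = ((k + rest.length - wn) + 1) := by
    rw [hlen]; omega
  rw [hn, List.range_succ_eq_map, List.findSome?_cons]
  have hchunk : ((List.replicate k c ++ rest).drop 0).take wn = List.replicate wn c := by
    rw [List.drop_zero, List.take_append_of_le_length (by simpa using hk)]
    simp [List.take_replicate, Nat.min_eq_left hk]
  have hh : (List.replicate wn c).head? = some c := by
    cases wn with
    | zero => omega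
    | succ n => simp [List.replicate_succ]
  have hhit : winHit (List.replicate k c ++ rest) wn 0 = some (List.replicate wn c) := by
    unfold winHit
    rw [hchunk, hh]
    simp
  simp [hhit]

-- Z: a window starting strictly inside a short leading run crosses the run
-- boundary, hence is not all-equal.
theorem winHit_cross (k wn i : Nat) (c d : Char) (rest' : List Char)
    (hik : i < k) (hkw : k < wn) (hd : d ≠ c) :
    winHit (List.replicate k c ++ d :: rest') wn i = none := by
  unfold winHit
  set l := List.replicate k c ++ d :: rest' with hl
  have hllen : l.length = k + (rest'.length + 1) := by simp [hl]
  set chunk := (l.drop i).take wn with hc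
  have hclen : chunk.length = min wn (l.length - i) := by
    simp [hc]
  have hki : k - i < chunk.length := by omega
  have hgk : l[k]? = some d := by
    rw [hl, List.getElem?_append_right (by simp)]
    simp
  have hval : chunk[k - i]? = some d := by
    rw [hc, List.getElem?_take_of_lt (by omega), List.getElem?_drop]
    have heq : i + (k - i) = k := by omega
    rw [heq]; exact hgk
  match hh : chunk.head? with
  | none => rfl
  | some c' =>
    dsimp only
    by_cases hrep : chunk = List.replicate wn c'
    · exfalso
      have h0 : chunk[k - i]? = some c' := by
        rw [hrep, List.getElem?_replicate, if_pos (by omega)]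
      have hcd : c' = d := by
        rw [h0] at hval; exact (Option.some.inj hval)
      have hc0 : chunk[0]? = some c' := by
        rw [← List.head?_eq_getElem?]; exact hh
      have hlc : l[i]? = some c := by
        rw [hl, List.getElem?_append_left (by simp; omega)]
        simp [hik]
      have hc0' : chunk[0]? = l[i]? := by
        rw [hc, List.getElem?_take_of_lt (by omega), List.getElem?_drop]
        simp
      have hcc : c' = c := by
        rw [hc0', hlc] at hc0; exact (Option.some.inj hc0).symm
      rw [hcc] at hcd
      exact hd hcd.symm
    · rw [if_neg hrep]

-- W2: a short leading run contributes nothing; winF recurses past it.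
theorem winF_short_run (k wn : Nat) (c : Char) (rest : List Char)
    (hk : k < wn) (hwn : 1 ≤ wn)
    (hhead : ∀ d t, rest = d :: t → d ≠ c) :
    winF (List.replicate k c ++ rest) wn = winF rest wn := by
  match rest with
  | [] =>
    unfold winF
    have h1 : (List.replicate k c ++ ([] : List Char)).length + 1 - wn = 0 := by
      simp; omega
    have h2 : ([] : List Char).length + 1 - wn = 0 := by simp; omega
    rw [h1, h2]
    rfl
  | d :: rest' =>
    have hd : d ≠ c := hhead d rest' rfl
    unfold winF
    set l := List.replicate k c ++ d :: rest' with hl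
    have hllen : l.length = k + (rest'.length + 1) := by simp [hl]
    by_cases hcase : l.length + 1 - wn ≤ k
    · -- every window crosses; both sides none
      have hr : (d :: rest').length + 1 - wn = 0 := by
        simp at hllen ⊢; omega
      rw [hr]
      simp only [List.range_zero, List.findSome?_nil]
      rw [List.findSome?_eq_none_iff]
      intro i hi
      rw [List.mem_range] at hi
      exact winHit_cross k wn i c d rest' (by omega) hk hd
    · have hn : l.length + 1 - wn = k + ((d :: rest').length + 1 - wn) := by
        simp at hllen ⊢; omega
      rw [hn, List.range_add, List.findSome?_append]
      have hleft : (List.range k).findSome? (winHit l wn) = none := by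
        rw [List.findSome?_eq_none_iff]
        intro i hi
        rw [List.mem_range] at hi
        exact winHit_cross k wn i c d rest' hi hk hd
      rw [hleft]
      simp only [Option.none_or]
      rw [List.findSome?_map]
      congr 1
      funext j
      show winHit l wn (k + j) = winHit (d :: rest') wn j
      unfold winHit
      have hdrop : l.drop (k + j) = (d :: rest').drop j := by
        rw [hl]
        simp [List.drop_append]
      rw [hdrop]

-- A's loop consuming a block of k copies of c while cur = "c": it returns
-- (m+1) copies of c as soon as the count exceeds m, else carries cnt + k on.
theorem findRepLoopA_run (m : Int) (c : Char) :
    ∀ (k : Nat) (cnt : Int) (rest' : List Char), 1 ≤ cnt → cnt ≤ m →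
    findRepLoopA (List.replicate k c ++ rest') (String.ofList [c]) cnt m =
      if cnt + (k : Int) > m then some (String.ofList (List.replicate (m + 1).toNat c))
      else findRepLoopA rest' (String.ofList [c]) (cnt + (k : Int)) m := by
  intro k
  induction k with
  | zero =>
    intro cnt rest' h1 h2
    simp only [Nat.cast_zero, add_zero, List.replicate_zero, List.nil_append]
    rw [if_neg (by omega)]
  | succ k ih =>
    intro cnt rest' h1 h2
    rw [List.replicate_succ, List.cons_append]
    rw [findRepLoopA, if_pos rfl]
    by_cases hgt : cnt + 1 > m
    · have hcond : cnt + ((k + 1 : Nat) : Int) > m := by push_cast; omega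
      have heq : (cnt + 1).toNat = (m + 1).toNat := by omega
      rw [if_pos hgt, if_pos hcond, heq]
    · have h2' : cnt + 1 ≤ m := by omega
      rw [if_neg hgt, ih (cnt + 1) rest' (by omega) h2']
      have heq : cnt + 1 + (k : Int) = cnt + ((k + 1 : Nat) : Int) := by push_cast; omega
      rw [heq]

-- A's loop computes the first all-equal window of length (m+1).toNat.
theorem findRepLoopA_eq_winF (m : Int) (hm : 1 ≤ m) :
    ∀ (n : Nat) (l : List Char), l.length ≤ n → ∀ (cur : String) (cnt : Int),
    (∀ d t, l = d :: t → cur ≠ String.ofList [d]) →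
    findRepLoopA l cur cnt m = (winF l (m + 1).toNat).map String.ofList := by
  intro n
  induction n with
  | zero =>
    intro l hlen cur cnt _
    have hnil : l = [] := List.eq_nil_of_length_eq_zero (Nat.le_zero.mp hlen)
    subst hnil
    have h0 : 1 - (m + 1).toNat = 0 := by omega
    simp [findRepLoopA, winF, h0]
  | succ n ih =>
    intro l hlen cur cnt hcur
    match l, hlen with
    | [], _ =>
      have h0 : 1 - (m + 1).toNat = 0 := by omega
      simp [findRepLoopA, winF, h0]
    | c :: rest, hlen =>
      have hrlen : rest.length ≤ n := by simpa using hlen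
      have hne : ¬ String.ofList [c] = cur := fun h => hcur c rest rfl h.symm
      rw [findRepLoopA, if_neg hne]
      set k := (rest.takeWhile (· = c)).length with hk
      have htake : rest.takeWhile (· = c) = List.replicate k c := by
        rw [List.eq_replicate_iff]
        exact ⟨rfl, fun b hb => by simpa using List.mem_takeWhile_imp hb⟩
      set drest := rest.dropWhile (· = c) with hd
      have hsplit : rest = List.replicate k c ++ drest := by
        rw [← htake, hd, List.takeWhile_append_dropWhile]
      have hdhead : ∀ d t, drest = d :: t → d ≠ c := by
        intro d t hdt
        have h := List.head?_dropWhile_not (fun x => decide (x = c)) rest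
        rw [← hd, hdt] at h
        simpa using h
      have hlsplit : c :: rest = List.replicate (k + 1) c ++ drest := by
        rw [List.replicate_succ, List.cons_append, ← hsplit]
      have hrun := findRepLoopA_run m c k 1 drest (by omega) hm
      conv_lhs => rw [hsplit]
      rw [hrun]
      set wn := (m + 1).toNat with hwn
      have hwn1 : 1 ≤ wn := by omega
      by_cases hgt : (1 : Int) + (k : Int) > m
      · have hlong : wn ≤ k + 1 := by omega
        rw [if_pos hgt]
        conv_rhs => rw [hlsplit]
        rw [winF_long_run (k + 1) wn c drest hlong hwn1]
        simp
      · have hshort : k + 1 < wn := by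
          have : (1 : Int) + (k : Int) ≤ m := by omega
          omega
        rw [if_neg hgt]
        conv_rhs => rw [hlsplit]
        rw [winF_short_run (k + 1) wn c drest hshort hwn1 hdhead]
        have hdlen : drest.length ≤ n := by
          have := List.length_dropWhile_le (fun x => decide (x = c)) rest
          simp only [hd]
          omega
        exact ih drest hdlen (String.ofList [c]) (1 + (k : Int))
          (fun d t hdt h => hdhead d t hdt (by simpa using (ofList_inj h.symm)))

-- ===== VERDICT (by name: the statement is the Claim_ definition above) =====
theorem find_repeated_py_spec : Claim_equal_find_repeated_py := by
  intro password m _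
  unfold Spec_find_repeated_py find_repeated_py find_repeated_py_alt
  by_cases hlt : m < 1
  · simp [hlt]
  · rw [if_neg hlt, if_neg hlt]
    show findRepLoopA password.toList "" 0 m =
      windowScanB password.toList (m + 1)
        (PySem.List.pyRange 0 ((password.toList.length : Int) - (m + 1) + 1) 1)
    have hm : 1 ≤ m := by omega
    set wn := (m + 1).toNat with hwn
    have hw : m + 1 = (wn : Int) := by omega
    set cl := password.toList with hcl
    have hrange : PySem.List.pyRange 0 ((cl.length : Int) - (m + 1) + 1) 1 =
        (List.range (cl.length + 1 - wn)).map (fun k => Int.ofNat k) := by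
      rw [PySem.List.pyRange_one]
      have : (((cl.length : Int) - (m + 1) + 1) - 0).toNat = cl.length + 1 - wn := by omega
      rw [this]
      simp
    rw [hrange]
    rw [windowScanB_eq cl wn m hm hw (List.range (cl.length + 1 - wn))
      (fun i hi => by rw [List.mem_range] at hi; omega)]
    exact findRepLoopA_eq_winF m hm cl.length cl le_rfl "" 0
      (fun d t _ h => by simpa using congrArg String.toList h)
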